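-- pv_equiv track=rewrite | github.com/TrevorMorrisey/Project-Euler | Python/pe002.py | evenFibonacciNumbers
-- ===== SOURCE A (Python) =====
-- def evenFibonacciNumbers(upperBound):
--     fibDict = {0:1, 1:2}
--
--     def getFibNumber(index):
--         if index in fibDict:
--             return fibDict[index]
--         else:
--             fibDict[index] = getFibNumber(index - 1) + getFibNumber(index - 2)
--             return fibDict[index]
--
--     sum = 0
--     currentFibNum = 0
--     index = 0
--     while True:
--         currentFibNum = getFibNumber(index)
--         if currentFibNum > upperBound:
--             break
--         elif currentFibNum % 2 == 0:
--             sum += currentFibNum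
--         index += 1
--
--     return sum
-- ===== SOURCE B (Python) =====
-- def evenFibonacciNumbers(upperBound):
--     total = 0
--     a, b = 1, 2
--     while a <= upperBound:
--         if a % 2 == 0:
--             total += a
--         a, b = b, a + b
--     return total
-- ===== Notes on version B (the rewrite author's own statement) =====
-- stated objective: simpler
-- what changed: Replaced the memo-dict plus recursive index-based helper with a direct two-variable iterative Fibonacci recurrence (same 1,2 seeds), removing the dict and recursion entirely.
import Mathlib
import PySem

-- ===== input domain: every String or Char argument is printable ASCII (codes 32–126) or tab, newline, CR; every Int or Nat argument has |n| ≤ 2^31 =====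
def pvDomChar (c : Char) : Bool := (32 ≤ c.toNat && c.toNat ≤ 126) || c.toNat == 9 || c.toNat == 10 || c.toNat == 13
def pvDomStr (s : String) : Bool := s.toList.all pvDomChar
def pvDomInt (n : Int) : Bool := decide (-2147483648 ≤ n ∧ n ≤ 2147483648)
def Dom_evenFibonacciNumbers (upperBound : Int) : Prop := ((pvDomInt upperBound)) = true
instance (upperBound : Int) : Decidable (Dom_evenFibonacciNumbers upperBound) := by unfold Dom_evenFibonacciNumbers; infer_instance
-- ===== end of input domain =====

-- B replaces A's memo-dict + recursive index-based Fibonacci helper by a direct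
-- two-variable iterative recurrence with the same 1,2 seeds (objective: simpler).


-- ===== PORT A =====
-- getFibNumber: memoized recursion on the index, threading the dict (Python closure state).
-- fuel is a totality guard only; each call site passes i.toNat + 1, which always suffices
-- because the loop queries indices in order so the dict already holds all smaller indices.
def getFibA (fuel : Nat) (d : PySem.Dict Int Int) (i : Int) : Int × PySem.Dict Int Int :=
  match fuel with
  | 0 => (0, d)
  | f + 1 =>
    match d.get? i with
    | some v => (v, d)
    | none =>
      let r1 := getFibA f d (i - 1)
      let r2 := getFibA f r1.2 (i - 2)
      (r1.1 + r2.1, r2.2.insert i (r1.1 + r2.1))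

-- the 'while True' loop; fuel upperBound.toNat + 1 is a totality guard (the loop breaks
-- no later than index upperBound since the n-th Fibonacci value here is at least n+1)
def loopA (upperBound : Int) : Nat → PySem.Dict Int Int → Int → Int → Int
  | 0, _, s, _ => s
  | f + 1, d, s, i =>
    let r := getFibA (i.toNat + 1) d i
    if r.1 > upperBound then s
    else loopA upperBound f r.2 (if PySem.Int.mod r.1 2 = 0 then s + r.1 else s) (i + 1)

def evenFibonacciNumbers (upperBound : Int) : Int :=
  loopA upperBound (upperBound.toNat + 1) (PySem.Dict.ofList [(0, 1), (1, 2)]) 0 0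

-- ===== PORT B =====
-- while a <= upperBound: if a % 2 == 0: total += a; a, b = b, a + b
def loopB (upperBound : Int) : Nat → Int → Int → Int → Int
  | 0, _, _, s => s
  | f + 1, a, b, s =>
    if a ≤ upperBound then
      loopB upperBound f b (a + b) (if PySem.Int.mod a 2 = 0 then s + a else s)
    else s

def evenFibonacciNumbers_alt (upperBound : Int) : Int :=
  loopB upperBound (upperBound.toNat + 1) 1 2 0

-- ===== PRECONDITION & SPEC =====
def Spec_evenFibonacciNumbers (upperBound : Int) (out : Int) : Prop := out = evenFibonacciNumbers_alt upperBound
instance (upperBound : Int) (out : Int) : Decidable (Spec_evenFibonacciNumbers upperBound out) := by unfold Spec_evenFibonacciNumbers; infer_instance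

-- ===== CLAIM (what is proved, stated in full; the proofs are below) =====
def Claim_equal_evenFibonacciNumbers : Prop := ∀ (upperBound : Int), Dom_evenFibonacciNumbers upperBound → Spec_evenFibonacciNumbers upperBound (evenFibonacciNumbers upperBound)

-- ===== LEMMAS AND PROOFS =====

-- the Fibonacci sequence with A's seeds 1, 2
def fibI : Nat → Int
  | 0 => 1
  | 1 => 2
  | n + 2 => fibI (n + 1) + fibI n

-- the memo dict after all indices 0..m have been queried in order
def memoD : Nat → PySem.Dict Int Int
  | 0 => PySem.Dict.ofList [(0, 1), (1, 2)]
  | 1 => PySem.Dict.ofList [(0, 1), (1, 2)]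
  | m + 2 => (memoD (m + 1)).insert ((m + 2 : Nat) : Int) (fibI (m + 2))

lemma get_memoD (m : Nat) (hm : 1 ≤ m) (j : Int) :
    (memoD m).get? j = if 0 ≤ j ∧ j ≤ (m : Int) then some (fibI j.toNat) else none := by
  induction m with
  | zero => omega
  | succ m ih =>
    match m, ih with
    | 0, _ =>
      have e : memoD 1 = PySem.Dict.mk [(0, 1), (1, 2)] := by decide
      rw [(by norm_num : (0:Nat) + 1 = 1), e, PySem.Dict.get?_mk_cons, PySem.Dict.get?_mk_cons]
      by_cases h0 : j = 0
      · subst h0; simp [fibI]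
      · by_cases h1 : j = 1
        · subst h1; simp [fibI]
        · have hb0 : ((0 : Int) == j) = false := by simp [Ne.symm h0]
          have hb1 : ((1 : Int) == j) = false := by simp [Ne.symm h1]
          rw [hb0, hb1]
          have hc : ¬ (0 ≤ j ∧ j ≤ ((1 : Nat) : Int)) := by push_cast; omega
          rw [if_neg hc]
          simp [PySem.Dict.get?]
    | m + 1, ih =>
      have ih' := ih (by omega)
      simp only [memoD]
      rw [PySem.Dict.get?_insert, ih']
      push_cast
      split_ifs <;>
        first
        | rfl
        | omega
        | (simp only [show j.toNat = m + 2 by omega])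

lemma getFib_in (f m n : Nat) (hf : 1 ≤ f) (hm : 1 ≤ m) (hn : n ≤ m) :
    getFibA f (memoD m) (n : Int) = (fibI n, memoD m) := by
  match f with
  | f + 1 =>
    simp only [getFibA]
    rw [get_memoD m hm]
    have : (0 ≤ (n : Int) ∧ (n : Int) ≤ (m : Int)) := by omega
    simp [this]

lemma getFib_new (f m : Nat) (hf : 2 ≤ f) (hm : 1 ≤ m) :
    getFibA f (memoD m) ((m : Int) + 1) = (fibI (m + 1), memoD (m + 1)) := by
  match f, m with
  | f + 1, m' + 1 =>
    simp only [getFibA]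
    rw [get_memoD _ hm]
    have hgt : ¬ (0 ≤ (↑(m' + 1) : Int) + 1 ∧ (↑(m' + 1) : Int) + 1 ≤ (↑(m' + 1) : Int)) := by
      push_cast; omega
    simp only [hgt, if_false]
    have e1 : ((m' + 1 : Nat) : Int) + 1 - 1 = ((m' + 1 : Nat) : Int) := by ring
    have e2 : ((m' + 1 : Nat) : Int) + 1 - 2 = ((m' : Nat) : Int) := by push_cast; ring
    rw [e1, getFib_in f (m' + 1) (m' + 1) (by omega) hm le_rfl]
    simp only
    rw [e2, getFib_in f (m' + 1) m' (by omega) hm (by omega)]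
    simp only [memoD]
    have e3 : ((m' + 1 : Nat) : Int) + 1 = ((m' + 2 : Nat) : Int) := by push_cast; ring
    have e4 : fibI (m' + 1) + fibI m' = fibI (m' + 2) := rfl
    rw [e3, e4]

lemma getFib_at (n : Nat) :
    getFibA (n + 1) (memoD (max (n - 1) 1)) (n : Int) = (fibI n, memoD (max n 1)) := by
  match n with
  | 0 => simpa using getFib_in 1 1 0 le_rfl le_rfl (by omega)
  | 1 => simpa using getFib_in 2 1 1 (by omega) le_rfl le_rfl
  | n + 2 =>
    have hmax1 : max (n + 2 - 1) 1 = n + 1 := by omega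
    have hmax2 : max (n + 2) 1 = n + 2 := by omega
    have ecast : ((n + 2 : Nat) : Int) = ((n + 1 : Nat) : Int) + 1 := by push_cast; ring
    rw [hmax1, hmax2, ecast, getFib_new (n + 3) (n + 1) (by omega) (by omega)]

lemma lockstep (ub : Int) (f : Nat) : ∀ (n : Nat) (s : Int),
    loopA ub f (memoD (max (n - 1) 1)) s (n : Int) = loopB ub f (fibI n) (fibI (n + 1)) s := by
  induction f with
  | zero => intro n s; rfl
  | succ f ih =>
    intro n s
    simp only [loopA, loopB]
    have ht : ((n : Int)).toNat = n := Int.toNat_natCast n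
    rw [ht, getFib_at n]
    by_cases h : fibI n ≤ ub
    · rw [if_neg (by omega), if_pos h]
      have e1 : (n : Int) + 1 = ((n + 1 : Nat) : Int) := by push_cast; ring
      have e2 : max n 1 = max ((n + 1) - 1) 1 := by omega
      have e3 : fibI n + fibI (n + 1) = fibI (n + 2) := by
        simp only [fibI]; ring
      rw [e1, e2, e3, ih (n + 1)]
    · rw [if_pos (by omega), if_neg h]

-- ===== VERDICT (by name: the statement is the Claim_ definition above) =====
theorem evenFibonacciNumbers_spec : Claim_equal_evenFibonacciNumbers := by
  intro ub _
  unfold Spec_evenFibonacciNumbers evenFibonacciNumbers evenFibonacciNumbers_alt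
  have h := lockstep ub (ub.toNat + 1) 0 0
  simpa [memoD, fibI] using h
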